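-- pv_equiv track=rewrite | github.com/mohammadkarrabi/crawl_and_match | scrapy_based_crawler.py | get_outliers
-- ===== SOURCE A (Python) =====
-- def get_outliers(lst):
--
--     groups = {}
--     # Group strings by first three characters
--     for string in lst:
--         try:
--             group_key = string.split('_')[1][:3]
--         except:
--             continue
--         # if group_key == '1700':
--         #     continue
--         if group_key not in groups:
--             groups[group_key] = [string]
--         else:
--             groups[group_key].append(string)
--
--     # Filter groups to only include single members
--     single_member_groups = [group[0] for group in groups.values() if len(group) == 1]
--
--     return single_member_groups
-- ===== SOURCE B (Python) =====
-- def get_outliers(lst):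
--     # Two-pass rewrite: count group keys once, then emit the strings whose key count is 1.
--     counts = {}
--     for string in lst:
--         try:
--             key = string.split('_')[1][:3]
--         except:
--             continue
--         counts[key] = counts.get(key, 0) + 1
--     result = []
--     for string in lst:
--         try:
--             key = string.split('_')[1][:3]
--         except:
--             continue
--         if counts[key] == 1:
--             result.append(string)
--     return result
-- ===== Notes on version B (the rewrite author's own statement) =====
-- stated objective: alternative
-- what changed: Replaces the dict of grouped member lists (plus a values() scan extracting group[0]) with a counter of keys built in one pass and a second pass over the input list that emits the strings whose key count is 1.
import Mathlib
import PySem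

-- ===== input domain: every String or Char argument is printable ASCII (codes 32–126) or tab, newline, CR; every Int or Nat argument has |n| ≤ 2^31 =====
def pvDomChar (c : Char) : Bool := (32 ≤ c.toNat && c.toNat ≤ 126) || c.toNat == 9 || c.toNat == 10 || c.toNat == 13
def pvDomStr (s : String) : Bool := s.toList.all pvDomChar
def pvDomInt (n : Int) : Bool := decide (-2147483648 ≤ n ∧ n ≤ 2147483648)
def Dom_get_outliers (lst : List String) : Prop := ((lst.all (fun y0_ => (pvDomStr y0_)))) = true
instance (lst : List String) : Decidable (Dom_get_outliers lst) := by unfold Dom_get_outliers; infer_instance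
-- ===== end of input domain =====

-- B replaces A's dict of grouped member lists (then a values() scan taking group[0]) by a
-- count-of-keys pass plus a second pass over the input emitting strings whose key count is 1
-- (objective: alternative decomposition, same cost).

-- ===== PORT A =====
-- key = string.split('_')[1][:3]; `none` = the IndexError that A's try/except swallows
-- (all elements are strings here, so IndexError is the only possible exception).
def pvKey (s : String) : Option String :=
  match PySem.Str.split? s "_" with
  | none => none
  | some parts =>
    match PySem.List.pyGet? parts 1 with
    | none => none
    | some t => some (PySem.Str.slice t none (some 3))

def get_outliers (lst : List String) : List String :=
  let groups : PySem.Dict String (List String) :=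
    lst.foldl (fun d s =>
      match pvKey s with
      | none => d      -- except: continue
      | some k =>
        if d.contains k = false then d.insert k [s]
        else d.modify k [] (fun g => g ++ [s])) PySem.Dict.empty
  -- [group[0] for group in groups.values() if len(group) == 1]
  -- (pyGet? is `some` on every kept group: the guard forces len(group) == 1)
  (groups.values.filter (fun g => PySem.List.len g == 1)).filterMap
    (fun g => PySem.List.pyGet? g 0)

-- ===== PORT B =====
def get_outliers_alt (lst : List String) : List String :=
  let counts : PySem.Dict String Int :=
    lst.foldl (fun c s =>
      match pvKey s with
      | none => c      -- except: continue
      | some k => c.insert k (c.getD k 0 + 1)) PySem.Dict.empty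
  lst.filter (fun s =>
    match pvKey s with
    | none => false    -- except: continue
    | some k => counts.getD k 0 == 1)

-- ===== PRECONDITION & SPEC =====
def Spec_get_outliers (lst : List String) (out : List String) : Prop := out = get_outliers_alt lst
instance (lst : List String) (out : List String) : Decidable (Spec_get_outliers lst out) := by unfold Spec_get_outliers; infer_instance

-- ===== CLAIM (what is proved, stated in full; the proofs are below) =====
def Claim_equal_get_outliers : Prop := ∀ (lst : List String), Dom_get_outliers lst → Spec_get_outliers lst (get_outliers lst)

-- ===== LEMMAS AND PROOFS =====

-- the group of `full`'s elements whose key is k, in order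
def pvGrp (full : List String) (k : String) : List String :=
  full.filter (fun s => pvKey s == some k)

-- what a key contributes to A's output
def pvF (full : List String) (k : String) : List String :=
  if (pvGrp full k).length = 1 then pvGrp full k else []

-- B's filter predicate, generalized by a set S of already-emitted keys
def pvPred (full S : List String) (s : String) : Bool :=
  match pvKey s with
  | none => false
  | some k => decide ((pvGrp full k).length = 1 ∧ k ∉ S)

-- the (key, string) pairs of the elements that have a key
def pvPairs (l : List String) : List (String × String) :=
  l.filterMap (fun s => (pvKey s).map (fun k => (k, s)))

theorem pvPairs_map_fst (l : List String) :
    (pvPairs l).map (·.1) = l.filterMap pvKey := by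
  induction l with
  | nil => rfl
  | cons s t ih =>
    simp only [pvPairs, List.filterMap_cons] at *
    cases h : pvKey s <;> simp [h, ih]

theorem pvPairs_filter_map_snd (l : List String) (c : String) :
    ((pvPairs l).filter (fun p => p.1 == c)).map (·.2) = pvGrp l c := by
  induction l with
  | nil => rfl
  | cons s t ih =>
    simp only [pvPairs, pvGrp, List.filterMap_cons, List.filter_cons] at *
    cases h : pvKey s with
    | none => simpa [h] using ih
    | some k =>
      by_cases hk : k = c <;> simp [h, hk, ih]

-- A's grouping loop is the modify-append loop over pvPairs
theorem pvFoldA_eq (l : List String) (d : PySem.Dict String (List String)) :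
    l.foldl (fun d s =>
      match pvKey s with
      | none => d
      | some k =>
        if d.contains k = false then d.insert k [s]
        else d.modify k [] (fun g => g ++ [s])) d
    = (pvPairs l).foldl (fun d p => d.modify p.1 [] (fun g => g ++ [p.2])) d := by
  induction l generalizing d with
  | nil => rfl
  | cons s t ih =>
    simp only [List.foldl_cons, pvPairs, List.filterMap_cons]
    cases h : pvKey s with
    | none => simpa [h, pvPairs] using ih d
    | some k =>
      simp only [h, Option.map_some, List.foldl_cons]
      by_cases hc : d.contains k = false
      · have : d.modify k [] (fun g => g ++ [s]) = d.insert k [s] := by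
          simp [PySem.Dict.modify, PySem.Dict.getD_of_not_contains (h := hc)]
        simp only [hc, if_true, ← this]
        exact ih _
      · simp only [hc, if_false]
        exact ih _

-- B's counting loop is the insert-add loop over the keys
theorem pvFoldB_eq (l : List String) (d : PySem.Dict String Int) :
    l.foldl (fun c s =>
      match pvKey s with
      | none => c
      | some k => c.insert k (c.getD k 0 + 1)) d
    = (l.filterMap pvKey).foldl (fun c k => c.insert k (c.getD k 0 + 1)) d := by
  induction l generalizing d with
  | nil => rfl
  | cons s t ih =>
    simp only [List.foldl_cons, List.filterMap_cons]
    cases h : pvKey s with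
    | none => simpa [h] using ih d
    | some k => simp only [h, List.foldl_cons]; exact ih _

theorem pvCount_filterMap (l : List String) (k : String) :
    (l.filterMap pvKey).count k = (pvGrp l k).length := by
  induction l with
  | nil => rfl
  | cons s t ih =>
    simp only [pvGrp, List.filterMap_cons, List.filter_cons] at *
    cases h : pvKey s with
    | none => simpa using ih
    | some k' =>
      by_cases hk : k' = k <;> simp [List.count_cons, hk, ih]

-- extracting group[0] of the singleton groups = flatMap pvF over the keys
theorem pvExtract (full : List String) (ks : List String) :
    ((ks.map (pvGrp full)).filter (fun g => PySem.List.len g == 1)).filterMap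
      (fun g => PySem.List.pyGet? g 0)
    = ks.flatMap (pvF full) := by
  induction ks with
  | nil => rfl
  | cons k t ih =>
    simp only [List.map_cons, List.filter_cons, List.flatMap_cons]
    by_cases h : (pvGrp full k).length = 1
    · obtain ⟨x, hx⟩ := List.length_eq_one_iff.mp h
      have hlen : (PySem.List.len (pvGrp full k) == 1) = true := by
        simp [PySem.List.len, h]
      have hget : PySem.List.pyGet? (pvGrp full k) 0 = some x := by
        simp [hx, PySem.List.pyGet?, PySem.List.pyIdx?]
      have hF : pvF full k = [x] := by rw [pvF, if_pos h, hx]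
      rw [hlen, if_pos rfl, List.filterMap_cons, hget, hF, ih]
      rfl
    · have hlen : (PySem.List.len (pvGrp full k) == 1) = false := by
        simp [PySem.List.len, beq_eq_false_iff_ne]
        exact_mod_cast h
      have hF : pvF full k = [] := by rw [pvF, if_neg h]
      rw [hlen, hF]
      simp only [Bool.false_eq_true, if_false, List.nil_append]
      exact ih

-- order argument: emitting singleton groups in first-key-occurrence order = filtering sub
theorem pvMain (full : List String) (sub S : List String) (hs : sub.Sublist full) :
    (PySem.Set.update S (sub.filterMap pvKey)).flatMap (pvF full)
      = S.flatMap (pvF full) ++ sub.filter (pvPred full S) := by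
  induction sub generalizing S with
  | nil => simp [PySem.Set.update_nil]
  | cons s t ih =>
    have hst : t.Sublist full := (List.sublist_cons_self s t).trans hs
    simp only [List.filterMap_cons, List.filter_cons]
    cases h : pvKey s with
    | none => simpa [pvPred, h] using ih S hst
    | some k =>
      rw [PySem.Set.update_cons]
      by_cases hmem : k ∈ S
      · rw [PySem.Set.add_of_mem hmem]
        have hp : pvPred full S s = false := by simp [pvPred, h, hmem]
        rw [hp]; simp only [Bool.false_eq_true, if_false]
        exact ih S hst
      · rw [PySem.Set.add_of_not_mem hmem]
        rw [ih (S ++ [k]) hst, List.flatMap_append]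
        by_cases hlen : (pvGrp full k).length = 1
        · -- the singleton group is [s], and t has no key-k element
          have hsub : ((s :: t).filter (fun x => pvKey x == some k)).Sublist (pvGrp full k) :=
            List.Sublist.filter _ hs
          rw [List.filter_cons] at hsub
          simp only [h, beq_self_eq_true, if_true] at hsub
          obtain ⟨x, hx⟩ := List.length_eq_one_iff.mp hlen
          rw [hx] at hsub
          have hxs : s = x ∧ t.filter (fun x => pvKey x == some k) = [] := by
            cases hcs : t.filter (fun x => pvKey x == some k) with
            | nil =>
              rw [hcs] at hsub
              exact ⟨by simpa using hsub.subset (List.mem_singleton_self s), rfl⟩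
            | cons a u =>
              rw [hcs] at hsub
              have := hsub.length_le
              simp at this
          have hnok : ∀ x ∈ t, (pvKey x == some k) = false := by
            intro y hy
            by_contra hc
            have : y ∈ t.filter (fun x => pvKey x == some k) :=
              List.mem_filter.mpr ⟨hy, by revert hc; cases (pvKey y == some k) <;> simp⟩
            rw [hxs.2] at this; exact absurd this (List.not_mem_nil)
          have hFk : pvF full k = [s] := by
            rw [pvF, if_pos hlen, hx, hxs.1]
          have hfilter : t.filter (pvPred full (S ++ [k])) = t.filter (pvPred full S) := by
            apply List.filter_congr
            intro y hy
            unfold pvPred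
            cases hky : pvKey y with
            | none => rfl
            | some k' =>
              have : k' ≠ k := by
                intro hkk
                have := hnok y hy
                rw [hky, hkk] at this; simp at this
              simp [this, hmem]
          have hps : pvPred full S s = true := by
            simp [pvPred, h, hlen, hmem]
          rw [hfilter, hps, if_pos rfl]
          simp only [List.flatMap_cons, List.flatMap_nil, List.append_nil, hFk]
          simp
        · have hFk : pvF full k = [] := by rw [pvF, if_neg hlen]
          have hps : pvPred full S s = false := by simp [pvPred, h, hlen]
          have hfilter : t.filter (pvPred full (S ++ [k])) = t.filter (pvPred full S) := by
            apply List.filter_congr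
            intro y hy
            unfold pvPred
            cases hky : pvKey y with
            | none => rfl
            | some k' =>
              by_cases hkk : k' = k
              · simp [hkk, hlen]
              · simp [hkk, hmem]
          rw [hfilter, hps]
          simp only [List.flatMap_cons, List.flatMap_nil, List.append_nil, hFk]
          simp

-- A's output, characterized
theorem pvA_eq (lst : List String) :
    get_outliers lst
      = (PySem.Set.ofList (lst.filterMap pvKey)).flatMap (pvF lst) := by
  unfold get_outliers
  rw [pvFoldA_eq]
  show (((( pvPairs lst).foldl (fun d p => d.modify p.1 [] fun g => g ++ [p.2])
      PySem.Dict.empty)).values.filter (fun g => PySem.List.len g == 1)).filterMap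
      (fun g => PySem.List.pyGet? g 0)
    = (PySem.Set.ofList (lst.filterMap pvKey)).flatMap (pvF lst)
  have hnd : ((pvPairs lst).foldl (fun d p => d.modify p.1 [] (fun g => g ++ [p.2]))
      PySem.Dict.empty).keys.Nodup := by
    apply PySem.Dict.nodup_keys_foldl_modify_key (pvPairs lst) Prod.fst []
      (fun d p => (fun g => g ++ [p.2])) PySem.Dict.empty
    simp [PySem.Dict.keys_empty]
  have hkeys : ((pvPairs lst).foldl (fun d p => d.modify p.1 [] (fun g => g ++ [p.2]))
      PySem.Dict.empty).keys = PySem.Set.ofList (lst.filterMap pvKey) := by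
    rw [PySem.Dict.keys_foldl_modify_key]
    rw [PySem.Dict.keys_empty, pvPairs_map_fst, PySem.Set.update_nil_left]
  have hget : ∀ c, ((pvPairs lst).foldl (fun d p => d.modify p.1 [] (fun g => g ++ [p.2]))
      PySem.Dict.empty).getD c [] = pvGrp lst c := by
    intro c
    rw [PySem.Dict.getD_foldl_modify_append, PySem.Dict.getD_empty, pvPairs_filter_map_snd]
    rfl
  rw [PySem.Dict.values_eq_map_keys _ hnd []]
  rw [hkeys]
  have : (PySem.Set.ofList (lst.filterMap pvKey)).map
      (fun k => ((pvPairs lst).foldl (fun d p => d.modify p.1 [] (fun g => g ++ [p.2]))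
        PySem.Dict.empty).getD k []) = (PySem.Set.ofList (lst.filterMap pvKey)).map (pvGrp lst) := by
    apply List.map_congr_left; intro k _; exact hget k
  rw [this, pvExtract]

-- B's output, characterized
theorem pvB_eq (lst : List String) :
    get_outliers_alt lst = lst.filter (pvPred lst []) := by
  unfold get_outliers_alt
  rw [pvFoldB_eq]
  apply List.filter_congr
  intro s _
  unfold pvPred
  cases h : pvKey s with
  | none => rfl
  | some k =>
    simp only []
    rw [PySem.Dict.getD_foldl_insert_add_one, PySem.Dict.getD_empty, pvCount_filterMap]
    simp only [List.not_mem_nil, not_false_iff, and_true, zero_add]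
    cases hd : decide ((pvGrp lst k).length = 1) with
    | true => simp at hd; simp [hd]
    | false =>
      simp at hd
      have : ((pvGrp lst k).length : Int) ≠ 1 := by exact_mod_cast hd
      simp [this]

-- ===== VERDICT (by name: the statement is the Claim_ definition above) =====
theorem get_outliers_spec : Claim_equal_get_outliers := by
  intro lst _
  unfold Spec_get_outliers
  rw [pvA_eq, pvB_eq]
  have := pvMain lst lst [] (List.Sublist.refl lst)
  rw [PySem.Set.update_nil_left] at this
  simpa using this
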